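-- pv_equiv track=rewrite | github.com/Centralmatrix3/Scripts | Scripts/Build/General.py | process_order
-- ===== SOURCE A (Python) =====
-- RULE_TYPE_ORDER = [
--     "DOMAIN",
--     "DOMAIN-SUFFIX",
--     "DOMAIN-KEYWORD",
--     "DOMAIN-WILDCARD",
--     "IP-CIDR",
--     "IP-CIDR6",
--     "IP-ASN",
--     "GEOIP"
-- ]
--
-- RULE_TYPE_INDEX = {rule: index for index, rule in enumerate(RULE_TYPE_ORDER)}
--
-- def process_order(lines, unknown_rule=False):
--     def rule_sort(line):
--         rule_type, _, rule_extra = line.partition(",")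
--         rule_index = RULE_TYPE_INDEX.get(rule_type, len(RULE_TYPE_ORDER))
--         return rule_index, rule_extra
--     seen = set()
--     for line in sorted(lines, key=rule_sort):
--         lower = line.lower()
--         rule_type = line.partition(",")[0]
--         if lower in seen or (rule_type not in RULE_TYPE_INDEX and not unknown_rule):
--             continue
--         seen.add(lower)
--         yield line
-- ===== SOURCE B (Python) =====
-- RULE_TYPE_ORDER = [
--     "DOMAIN",
--     "DOMAIN-SUFFIX",
--     "DOMAIN-KEYWORD",
--     "DOMAIN-WILDCARD",
--     "IP-CIDR",
--     "IP-CIDR6",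
--     "IP-ASN",
--     "GEOIP"
-- ]
--
-- RULE_TYPE_INDEX = {rule: index for index, rule in enumerate(RULE_TYPE_ORDER)}
--
-- def process_order(lines, unknown_rule=False):
--     # One pass: keep, per lowercased line, the representative with the smallest
--     # (rule_index, rule_extra, position) key; then filter unknown types, sort the
--     # representatives by that key and yield them.
--     n = len(RULE_TYPE_ORDER)
--     best = {}
--     for pos, line in enumerate(lines):
--         rule_type, _, rule_extra = line.partition(",")
--         key = (RULE_TYPE_INDEX.get(rule_type, n), rule_extra, pos)
--         low = line.lower()
--         cur = best.get(low)
--         if cur is None or key < cur[0]: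
--             best[low] = (key, line)
--     reps = [v for v in best.values() if unknown_rule or v[0][0] < n]
--     reps.sort(key=lambda v: v[0])
--     for _, line in reps:
--         yield line
-- ===== Notes on version B (the rewrite author's own statement) =====
-- stated objective: alternative
-- what changed: Replaces A's sort-all-lines-then-linear-dedup-with-a-seen-set by a one-pass table keyed on line.lower() keeping the (rule_index, rule_extra, position)-minimal representative, then filtering unknown types and sorting only the surviving representatives.
import Mathlib
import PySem

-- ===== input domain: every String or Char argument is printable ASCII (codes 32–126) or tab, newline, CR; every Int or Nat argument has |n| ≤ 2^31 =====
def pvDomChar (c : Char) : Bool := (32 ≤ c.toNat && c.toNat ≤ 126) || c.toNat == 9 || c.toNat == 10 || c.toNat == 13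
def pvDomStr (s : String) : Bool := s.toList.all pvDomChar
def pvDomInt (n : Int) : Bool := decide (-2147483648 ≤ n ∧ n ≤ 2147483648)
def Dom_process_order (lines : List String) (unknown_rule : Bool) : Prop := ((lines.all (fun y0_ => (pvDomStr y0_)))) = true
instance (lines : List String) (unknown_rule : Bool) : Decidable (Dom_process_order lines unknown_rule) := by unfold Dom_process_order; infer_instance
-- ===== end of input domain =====

-- B replaces A's sort-all-then-dedup-with-a-seen-set by a one-pass minimal-representative
-- table keyed on line.lower(), then filters and sorts only the representatives (alternative
-- decomposition; return-value equivalence — both Pythons are generators, compared as lists).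

-- ===== PORT A =====
def RULE_TYPE_ORDER : List String :=
  ["DOMAIN", "DOMAIN-SUFFIX", "DOMAIN-KEYWORD", "DOMAIN-WILDCARD",
   "IP-CIDR", "IP-CIDR6", "IP-ASN", "GEOIP"]

def RULE_TYPE_INDEX : PySem.Dict String Int :=
  PySem.Dict.ofList ((PySem.List.enumerate RULE_TYPE_ORDER 0).map (fun p => (p.2, p.1)))

-- line.partition(",") (exact: split at the FIRST ','; no ',' gives (line, "", ""))
def partComma : List Char → List Char × List Char
  | [] => ([], [])
  | c :: rest =>
    if c = ',' then ([], rest)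
    else
      let r := partComma rest
      (c :: r.1, r.2)

def ruleType (line : String) : String := String.ofList (partComma line.toList).1
def ruleExtra (line : String) : String := String.ofList (partComma line.toList).2

-- rule_sort's first component: RULE_TYPE_INDEX.get(rule_type, len(RULE_TYPE_ORDER))
def ruleIndex (line : String) : Int :=
  RULE_TYPE_INDEX.getD (ruleType line) (PySem.List.len RULE_TYPE_ORDER)

def process_order (lines : List String) (unknown_rule : Bool) : List String :=
  ((PySem.List.sorted2 lines ruleIndex ruleExtra false).foldl
    (fun (acc : PySem.Set String × List String) line =>
      let lower := PySem.Str.lower line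
      if PySem.Set.contains acc.1 lower
         || (!(RULE_TYPE_INDEX.contains (ruleType line)) && !unknown_rule) then acc
      else (PySem.Set.add acc.1 lower, acc.2 ++ [line]))
    (PySem.Set.empty, [])).2

-- ===== PORT B =====
-- Python tuple comparison on the (rule_index, rule_extra, position) key
def tripLt (a b : Int × String × Int) : Bool :=
  decide (a.1 < b.1)
  || (a.1 == b.1 && (decide (a.2.1 < b.2.1) || (a.2.1 == b.2.1 && decide (a.2.2 < b.2.2))))

-- the same key, as a lexicographic sort key for reps.sort(key=lambda v: v[0])
def tripKey (v : (Int × String × Int) × String) : Lex (Int × Lex (String × Int)) :=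
  toLex (v.1.1, toLex (v.1.2.1, v.1.2.2))

def process_order_alt (lines : List String) (unknown_rule : Bool) : List String :=
  let n : Int := PySem.List.len RULE_TYPE_ORDER
  let best :=
    (PySem.List.enumerate lines 0).foldl
      (fun (d : PySem.Dict String ((Int × String × Int) × String)) pl =>
        let key : Int × String × Int := (RULE_TYPE_INDEX.getD (ruleType pl.2) n, ruleExtra pl.2, pl.1)
        let low := PySem.Str.lower pl.2
        match d.get? low with
        | none => d.insert low (key, pl.2)
        | some cur => if tripLt key cur.1 then d.insert low (key, pl.2) else d)
      PySem.Dict.empty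
  let reps := best.values.filter (fun v => unknown_rule || decide (v.1.1 < n))
  (PySem.List.sorted reps tripKey false).map (fun v => v.2)

-- ===== PRECONDITION & SPEC =====
def Spec_process_order (lines : List String) (unknown_rule : Bool) (out : List String) : Prop := out = process_order_alt lines unknown_rule
instance (lines : List String) (unknown_rule : Bool) (out : List String) : Decidable (Spec_process_order lines unknown_rule out) := by unfold Spec_process_order; infer_instance

-- ===== CLAIM (what is proved, stated in full; the proofs are below) =====
def Claim_equal_process_order : Prop := ∀ (lines : List String) (unknown_rule : Bool), Dom_process_order lines unknown_rule → Spec_process_order lines unknown_rule (process_order lines unknown_rule)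

-- ===== LEMMAS AND PROOFS =====

-- the sort key of an enumerated line, position included (a strict total key)
def key3 (e : Int × String) : Lex (Int × Lex (String × Int)) :=
  toLex (ruleIndex e.2, toLex (ruleExtra e.2, e.1))

-- the dict value B stores for an enumerated line
def valOf (e : Int × String) : (Int × String × Int) × String :=
  ((ruleIndex e.2, ruleExtra e.2, e.1), e.2)

-- "this line survives the unknown-type filter"
def keepB (u : Bool) (s : String) : Bool := u || RULE_TYPE_INDEX.contains (ruleType s)

-- A's dedup loop, lifted to enumerated pairs
def dedupA (u : Bool) : List (Int × String) → PySem.Set String → List (Int × String)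
  | [], _ => []
  | e :: rest, seen =>
    if PySem.Set.contains seen (PySem.Str.lower e.2)
       || (!(RULE_TYPE_INDEX.contains (ruleType e.2)) && !u)
    then dedupA u rest seen
    else e :: dedupA u rest (PySem.Set.add seen (PySem.Str.lower e.2))

-- B's dict-building step (definitionally the lambda in process_order_alt)
def bstep (d : PySem.Dict String ((Int × String × Int) × String)) (pl : Int × String) :
    PySem.Dict String ((Int × String × Int) × String) :=
  let key : Int × String × Int :=
    (RULE_TYPE_INDEX.getD (ruleType pl.2) (PySem.List.len RULE_TYPE_ORDER), ruleExtra pl.2, pl.1)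
  let low := PySem.Str.lower pl.2
  match d.get? low with
  | none => d.insert low (key, pl.2)
  | some cur => if tripLt key cur.1 then d.insert low (key, pl.2) else d

lemma len_RTO : PySem.List.len RULE_TYPE_ORDER = 8 := by decide

lemma ruleIndex_known {s : String} (h : RULE_TYPE_INDEX.contains (ruleType s) = true) :
    ruleIndex s < 8 := by
  rw [PySem.Dict.contains_eq_isSome_get?] at h
  obtain ⟨v, hv⟩ := Option.isSome_iff_exists.mp h
  have hval : v ∈ RULE_TYPE_INDEX.values :=
    List.mem_map_of_mem (PySem.Dict.mem_items_of_get?_eq_some _ hv)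
  have hlt : ∀ w ∈ RULE_TYPE_INDEX.values, w < 8 := by decide
  have : ruleIndex s = v := PySem.Dict.getD_of_get?_eq_some _ _ hv
  rw [this]; exact hlt v hval

lemma ruleIndex_unknown {s : String} (h : RULE_TYPE_INDEX.contains (ruleType s) = false) :
    ruleIndex s = 8 := by
  unfold ruleIndex
  rw [PySem.Dict.getD_of_not_contains _ _ h, len_RTO]

lemma ruleIndex_lt_iff (s : String) :
    (ruleIndex s < 8) ↔ RULE_TYPE_INDEX.contains (ruleType s) = true := by
  constructor
  · intro h
    by_contra hc
    have hfalse : RULE_TYPE_INDEX.contains (ruleType s) = false := by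
      cases hb : RULE_TYPE_INDEX.contains (ruleType s) with
      | false => rfl
      | true => exact absurd hb hc
    rw [ruleIndex_unknown hfalse] at h
    omega
  · exact ruleIndex_known

lemma tripLt_eq (a b : Int × String × Int) :
    tripLt a b = decide (toLex (a.1, toLex (a.2.1, a.2.2)) < toLex (b.1, toLex (b.2.1, b.2.2))) := by
  rw [Bool.eq_iff_iff]
  simp only [tripLt, Bool.or_eq_true, Bool.and_eq_true, decide_eq_true_eq, beq_iff_eq,
    Prod.Lex.toLex_lt_toLex]

lemma key3_fst_eq {a b : Int × String} (h : key3 a = key3 b) : a.1 = b.1 := by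
  simp only [key3, toLex_inj, Prod.mk.injEq] at h
  exact h.2.2

-- stability: Python's stable sort with tuple key (idx, extra) IS the sort with
-- the strict key (idx, extra, position) on the enumerated list
lemma bef_agree (x : String) (n : Int) (e : Int × String) (hp : e.1 < n) :
    decide (key3 (n, x) < key3 e)
      = (decide (ruleIndex x < ruleIndex e.2)
         || (!decide (ruleIndex e.2 < ruleIndex x) && decide (ruleExtra x < ruleExtra e.2))) := by
  obtain ⟨p, y⟩ := e
  simp only at hp
  rw [Bool.eq_iff_iff]
  simp only [key3, Prod.Lex.toLex_lt_toLex, decide_eq_true_eq, Bool.or_eq_true,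
    Bool.and_eq_true, Bool.not_eq_eq_eq_not, Bool.not_true, decide_eq_false_iff_not, not_lt]
  constructor
  · rintro (h | ⟨h1, (h2 | ⟨h3, h4⟩)⟩)
    · exact Or.inl h
    · exact Or.inr ⟨le_of_eq h1, h2⟩
    · exact absurd h4 (by omega)
  · rintro (h | ⟨h1, h2⟩)
    · exact Or.inl h
    · rcases lt_or_eq_of_le h1 with h3 | h3
      · exact Or.inl h3
      · exact Or.inr ⟨h3, Or.inl h2⟩

lemma insertBy_map_snd (x : String) (n : Int) :
    ∀ S : List (Int × String), (∀ e ∈ S, e.1 < n) →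
      (PySem.List.insertBy (fun a b => decide (key3 a < key3 b)) (n, x) S).map Prod.snd
        = PySem.List.insertBy
            (fun a b => decide (ruleIndex a < ruleIndex b)
              || (!decide (ruleIndex b < ruleIndex a) && decide (ruleExtra a < ruleExtra b)))
            x (S.map Prod.snd) := by
  intro S
  induction S with
  | nil => intro _; simp [PySem.List.insertBy]
  | cons e S' ih =>
    intro hb
    have he : e.1 < n := hb e (List.mem_cons_self ..)
    have hagree := bef_agree x n e he
    simp only [PySem.List.insertBy, List.map_cons]
    cases hcond : (decide (ruleIndex x < ruleIndex e.2)
        || (!decide (ruleIndex e.2 < ruleIndex x) && decide (ruleExtra x < ruleExtra e.2))) with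
    | true => rw [← hagree] at hcond; simp [hcond]
    | false =>
      rw [← hagree] at hcond
      simp only [hcond, if_false, Bool.false_eq_true, List.map_cons, List.cons.injEq, true_and]
      exact ih (fun f hf => hb f (List.mem_cons_of_mem _ hf))

lemma sortStable (lines : List String) :
    PySem.List.sorted2 lines ruleIndex ruleExtra false
      = (PySem.List.sorted (PySem.List.enumerate lines 0) key3 false).map Prod.snd := by
  induction lines using List.reverseRecOn with
  | nil => rfl
  | append_singleton ys x ih =>
    have hE : PySem.List.enumerate (ys ++ [x]) 0
        = PySem.List.enumerate ys 0 ++ [((ys.length : Int), x)] := by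
      rw [PySem.List.enumerate_append]
      simp [PySem.List.enumerate]
    have hs3 : PySem.List.sorted (PySem.List.enumerate (ys ++ [x]) 0) key3 false
        = PySem.List.insertBy (fun a b => decide (key3 a < key3 b)) ((ys.length : Int), x)
            (PySem.List.sorted (PySem.List.enumerate ys 0) key3 false) := by
      rw [hE, PySem.List.sorted_eq_foldl_insertBy, List.foldl_append,
        ← PySem.List.sorted_eq_foldl_insertBy]
      rfl
    have hs2 : PySem.List.sorted2 (ys ++ [x]) ruleIndex ruleExtra false
        = PySem.List.insertBy
            (fun a b => decide (ruleIndex a < ruleIndex b)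
              || (!decide (ruleIndex b < ruleIndex a) && decide (ruleExtra a < ruleExtra b)))
            x (PySem.List.sorted2 ys ruleIndex ruleExtra false) := by
      simp only [PySem.List.sorted2, if_neg (by decide : ¬ (false = true)), List.foldl_append,
        List.foldl_cons, List.foldl_nil]
    rw [hs2, hs3, ih, insertBy_map_snd]
    intro e he
    rw [PySem.List.mem_sorted] at he
    obtain ⟨k, hk, rfl⟩ := (PySem.List.mem_enumerate_iff _ _ _).mp he
    simp only [zero_add]
    exact_mod_cast hk

lemma T_pairwise (lines : List String) :
    (PySem.List.sorted (PySem.List.enumerate lines 0) key3 false).Pairwise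
      (fun a b => key3 a < key3 b) := by
  have h1 := PySem.List.sorted_pairwise (PySem.List.enumerate lines 0) key3
  have h2 : (PySem.List.enumerate lines 0).Pairwise (fun a b => a.1 ≠ b.1) :=
    (PySem.List.pairwise_lt_enumerate lines 0).imp (fun h => ne_of_lt h)
  have h3 : (PySem.List.sorted (PySem.List.enumerate lines 0) key3 false).Pairwise
      (fun a b => a.1 ≠ b.1) :=
    (List.Perm.pairwise_iff (fun h => h.symm)
      (PySem.List.sorted_perm (PySem.List.enumerate lines 0) key3 false)).mpr h2
  exact (h1.and h3).imp (fun h => lt_of_le_of_ne h.1 (fun hk => h.2 (key3_fst_eq hk)))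

lemma foldl_dedupA (u : Bool) :
    ∀ (L : List (Int × String)) (seen : PySem.Set String) (out : List String),
      ((L.map Prod.snd).foldl
        (fun (acc : PySem.Set String × List String) line =>
          let lower := PySem.Str.lower line
          if PySem.Set.contains acc.1 lower
             || (!(RULE_TYPE_INDEX.contains (ruleType line)) && !u) then acc
          else (PySem.Set.add acc.1 lower, acc.2 ++ [line]))
        (seen, out)).2
      = out ++ (dedupA u L seen).map Prod.snd := by
  intro L
  induction L with
  | nil => intro seen out; simp [dedupA]
  | cons e L' ih =>
    intro seen out
    simp only [List.map_cons, List.foldl_cons, dedupA]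
    cases hc : (PySem.Set.contains seen (PySem.Str.lower e.2)
        || (!(RULE_TYPE_INDEX.contains (ruleType e.2)) && !u)) with
    | true => simp only [if_true]; exact ih seen out
    | false =>
      simp only [if_false, Bool.false_eq_true, List.map_cons]
      rw [ih]
      simp

lemma A_eq (lines : List String) (u : Bool) :
    process_order lines u
      = (dedupA u (PySem.List.sorted (PySem.List.enumerate lines 0) key3 false)
          PySem.Set.empty).map Prod.snd := by
  unfold process_order
  rw [sortStable, foldl_dedupA]
  simp

lemma dedupA_sublist (u : Bool) :
    ∀ (L : List (Int × String)) (seen : PySem.Set String), (dedupA u L seen).Sublist L := by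
  intro L
  induction L with
  | nil => intro seen; simp [dedupA]
  | cons e L' ih =>
    intro seen
    rw [dedupA]
    split
    · exact (ih seen).cons e
    · exact (ih _).cons₂ e

lemma dedupA_mem (u : Bool) :
    ∀ (L : List (Int × String)) (seen : PySem.Set String),
      L.Pairwise (fun a b => key3 a < key3 b) →
      ∀ e, e ∈ dedupA u L seen ↔
        e ∈ L ∧ keepB u e.2 = true
          ∧ PySem.Set.contains seen (PySem.Str.lower e.2) = false
          ∧ ∀ f ∈ L, PySem.Str.lower f.2 = PySem.Str.lower e.2 → keepB u f.2 = true →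
              key3 e ≤ key3 f := by
  intro L
  induction L with
  | nil => intro seen _ e; simp [dedupA]
  | cons h0 rest ih =>
    intro seen hpw e
    obtain ⟨hhead, hpwrest⟩ := List.pairwise_cons.mp hpw
    rw [dedupA]
    by_cases hC : (PySem.Set.contains seen (PySem.Str.lower h0.2)
        || (!(RULE_TYPE_INDEX.contains (ruleType h0.2)) && !u)) = true
    · rw [if_pos hC, ih seen hpwrest e]
      have hCcases : PySem.Set.contains seen (PySem.Str.lower h0.2) = true
          ∨ keepB u h0.2 = false := by
        rcases (by simpa using hC :
            PySem.Set.contains seen (PySem.Str.lower h0.2) = true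
              ∨ (RULE_TYPE_INDEX.contains (ruleType h0.2) = false ∧ u = false)) with h1 | h2
        · exact Or.inl h1
        · right; simp [keepB, h2.1, h2.2]
      constructor
      · rintro ⟨he, hk, hs, hmin⟩
        refine ⟨List.mem_cons_of_mem _ he, hk, hs, ?_⟩
        intro f hf hlow hkf
        rcases List.mem_cons.mp hf with rfl | hf'
        · exfalso
          rcases hCcases with h1 | h2
          · rw [hlow] at h1; rw [h1] at hs; cases hs
          · rw [hkf] at h2; cases h2
        · exact hmin f hf' hlow hkf
      · rintro ⟨he, hk, hs, hmin⟩
        rcases List.mem_cons.mp he with rfl | he'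
        · exfalso
          rcases hCcases with h1 | h2
          · rw [h1] at hs; cases hs
          · rw [hk] at h2; cases h2
        · exact ⟨he', hk, hs, fun f hf hl hkf => hmin f (List.mem_cons_of_mem _ hf) hl hkf⟩
    · rw [if_neg hC]
      have hparts : PySem.Set.contains seen (PySem.Str.lower h0.2) = false
          ∧ keepB u h0.2 = true := by
        have h2 : (u = true ∨ RULE_TYPE_INDEX.contains (ruleType h0.2) = true)
            ∧ PySem.Str.lower h0.2 ∉ seen := by
          simpa [Decidable.imp_iff_not_or, or_comm] using hC
        refine ⟨?_, ?_⟩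
        · cases hcs : PySem.Set.contains seen (PySem.Str.lower h0.2) with
          | false => rfl
          | true => exact absurd ((PySem.Set.contains_iff _ _).mp hcs) h2.2
        · simp only [keepB, Bool.or_eq_true]
          exact h2.1
      obtain ⟨hseen0, hkeep0⟩ := hparts
      have hh0notrest : ∀ f ∈ rest, key3 h0 < key3 f := hhead
      constructor
      · intro hmem
        rcases List.mem_cons.mp hmem with rfl | hmem'
        · refine ⟨List.mem_cons_self .., hkeep0, hseen0, ?_⟩
          intro f hf _ _
          rcases List.mem_cons.mp hf with rfl | hf'
          · exact le_refl _
          · exact le_of_lt (hh0notrest f hf')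
        · obtain ⟨he', hk, hs', hmin⟩ := (ih _ hpwrest e).mp hmem'
          have hs2 : PySem.Set.contains seen (PySem.Str.lower e.2) = false
              ∧ PySem.Str.lower e.2 ≠ PySem.Str.lower h0.2 := by
            constructor
            · cases hcs : PySem.Set.contains seen (PySem.Str.lower e.2) with
              | false => rfl
              | true =>
                exfalso
                have : PySem.Str.lower e.2 ∈ PySem.Set.add seen (PySem.Str.lower h0.2) :=
                  (PySem.Set.mem_add _ _ _).mpr (Or.inl ((PySem.Set.contains_iff _ _).mp hcs))
                rw [(PySem.Set.contains_iff _ _).mpr this] at hs'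
                cases hs'
            · intro hEq
              have : PySem.Str.lower e.2 ∈ PySem.Set.add seen (PySem.Str.lower h0.2) :=
                (PySem.Set.mem_add _ _ _).mpr (Or.inr hEq)
              rw [(PySem.Set.contains_iff _ _).mpr this] at hs'
              cases hs'
          refine ⟨List.mem_cons_of_mem _ he', hk, hs2.1, ?_⟩
          intro f hf hl hkf
          rcases List.mem_cons.mp hf with rfl | hf'
          · exact absurd hl.symm hs2.2
          · exact hmin f hf' hl hkf
      · rintro ⟨he, hk, hs, hmin⟩
        rcases List.mem_cons.mp he with rfl | he'
        · exact List.mem_cons_self ..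
        · have hne : PySem.Str.lower e.2 ≠ PySem.Str.lower h0.2 := by
            intro hEq
            have h1 := hmin h0 (List.mem_cons_self ..) hEq.symm hkeep0
            exact absurd h1 (not_le.mpr (hh0notrest e he'))
          have hcadd : PySem.Set.contains (PySem.Set.add seen (PySem.Str.lower h0.2))
              (PySem.Str.lower e.2) = false := by
            cases hcs : PySem.Set.contains (PySem.Set.add seen (PySem.Str.lower h0.2))
                (PySem.Str.lower e.2) with
            | false => rfl
            | true =>
              exfalso
              rcases (PySem.Set.mem_add _ _ _).mp ((PySem.Set.contains_iff _ _).mp hcs) with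
                hm | hm
              · rw [(PySem.Set.contains_iff _ _).mpr hm] at hs; cases hs
              · exact hne hm
          exact List.mem_cons_of_mem _
            ((ih _ hpwrest e).mpr
              ⟨he', hk, hcadd, fun f hf hl hkf => hmin f (List.mem_cons_of_mem _ hf) hl hkf⟩)

-- B's dict after the one-pass fold: keys are the distinct lowers, entry = group minimum
lemma best_inv :
    ∀ P : List (Int × String), P.Pairwise (fun a b => a.1 < b.1) →
      ((P.foldl bstep PySem.Dict.empty).keys
          = PySem.Set.ofList (P.map (fun e => PySem.Str.lower e.2)))
      ∧ (∀ ℓ v, (P.foldl bstep PySem.Dict.empty).get? ℓ = some v →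
          ∃ e ∈ P, PySem.Str.lower e.2 = ℓ ∧ v = valOf e
            ∧ ∀ f ∈ P, PySem.Str.lower f.2 = ℓ → key3 e ≤ key3 f)
      ∧ (∀ ℓ, (P.foldl bstep PySem.Dict.empty).get? ℓ = none →
          ∀ e ∈ P, PySem.Str.lower e.2 ≠ ℓ) := by
  intro P
  induction P using List.reverseRecOn with
  | nil =>
    intro _
    refine ⟨?_, ?_, ?_⟩ <;> simp [PySem.Dict.keys_empty, PySem.Dict.get?_empty]
  | append_singleton P e ih =>
    intro hpw
    have hP : P.Pairwise (fun a b => a.1 < b.1) :=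
      hpw.sublist (List.sublist_append_left _ _)
    obtain ⟨ihk, ihs, ihn⟩ := ih hP
    have hfold : (P ++ [e]).foldl bstep PySem.Dict.empty
        = bstep (P.foldl bstep PySem.Dict.empty) e := by
      rw [List.foldl_append, List.foldl_cons, List.foldl_nil]
    rw [hfold]
    have hmaps : (P ++ [e]).map (fun f => PySem.Str.lower f.2)
        = P.map (fun f => PySem.Str.lower f.2) ++ [PySem.Str.lower e.2] := by
      simp
    cases hg : (P.foldl bstep PySem.Dict.empty).get? (PySem.Str.lower e.2) with
    | none =>
      have hstep : bstep (P.foldl bstep PySem.Dict.empty) e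
          = (P.foldl bstep PySem.Dict.empty).insert (PySem.Str.lower e.2) (valOf e) := by
        simp only [bstep, hg]; rfl
      have hcont : (P.foldl bstep PySem.Dict.empty).contains (PySem.Str.lower e.2) = false := by
        rw [PySem.Dict.contains_eq_isSome_get?, hg]; rfl
      have hnotmem : PySem.Str.lower e.2
          ∉ PySem.Set.ofList (P.map (fun f => PySem.Str.lower f.2)) := by
        intro hmem
        obtain ⟨f, hf, hfl⟩ := List.mem_map.mp ((PySem.Set.mem_ofList _ _).mp hmem)
        exact (ihn _ hg f hf) hfl
      refine ⟨?_, ?_, ?_⟩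
      · rw [hstep, PySem.Dict.keys_insert_of_not_contains _ _ hcont, ihk, hmaps,
          PySem.Set.ofList_append_singleton, PySem.Set.add_of_not_mem hnotmem]
      · intro ℓ v hv
        rw [hstep, PySem.Dict.get?_insert] at hv
        by_cases hl : ℓ = PySem.Str.lower e.2
        · rw [if_pos hl] at hv
          refine ⟨e, List.mem_append_right _ (List.mem_cons_self ..), hl.symm,
            (Option.some.injEq _ _ ▸ hv).symm, ?_⟩
          intro f hf hfl
          rcases List.mem_append.mp hf with hf' | hf'
          · exact absurd (hl ▸ hfl) (ihn _ hg f hf')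
          · rw [List.mem_singleton.mp hf']
        · rw [if_neg hl] at hv
          obtain ⟨m, hmP, hml, hmv, hmmin⟩ := ihs ℓ v hv
          refine ⟨m, List.mem_append_left _ hmP, hml, hmv, ?_⟩
          intro f hf hfl
          rcases List.mem_append.mp hf with hf' | hf'
          · exact hmmin f hf' hfl
          · rw [List.mem_singleton.mp hf'] at hfl
            exact absurd hfl.symm hl
      · intro ℓ hℓ
        rw [hstep, PySem.Dict.get?_insert] at hℓ
        by_cases hl : ℓ = PySem.Str.lower e.2
        · rw [if_pos hl] at hℓ; cases hℓ
        · rw [if_neg hl] at hℓ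
          intro f hf
          rcases List.mem_append.mp hf with hf' | hf'
          · exact ihn ℓ hℓ f hf'
          · rw [List.mem_singleton.mp hf']
            exact fun h => hl h.symm
    | some cur =>
      obtain ⟨m, hmP, hml, hmv, hmmin⟩ := ihs _ cur hg
      have htl : tripLt (RULE_TYPE_INDEX.getD (ruleType e.2) (PySem.List.len RULE_TYPE_ORDER),
          ruleExtra e.2, e.1) cur.1 = decide (key3 e < key3 m) := by
        rw [hmv]; exact tripLt_eq _ _
      have hstep : bstep (P.foldl bstep PySem.Dict.empty) e
          = if decide (key3 e < key3 m) = true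
            then (P.foldl bstep PySem.Dict.empty).insert (PySem.Str.lower e.2) (valOf e)
            else P.foldl bstep PySem.Dict.empty := by
        simp only [bstep, hg, htl]; rfl
      have hcont : (P.foldl bstep PySem.Dict.empty).contains (PySem.Str.lower e.2) = true := by
        rw [PySem.Dict.contains_eq_isSome_get?, hg]; rfl
      have hmem : PySem.Str.lower e.2
          ∈ PySem.Set.ofList (P.map (fun f => PySem.Str.lower f.2)) := by
        exact (PySem.Set.mem_ofList _ _).mpr (List.mem_map.mpr ⟨m, hmP, hml⟩)
      by_cases hlt : key3 e < key3 m
      · rw [if_pos (decide_eq_true hlt)] at hstep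
        refine ⟨?_, ?_, ?_⟩
        · rw [hstep, PySem.Dict.keys_insert_of_contains _ _ hcont, ihk, hmaps,
            PySem.Set.ofList_append_singleton, PySem.Set.add_of_mem hmem]
        · intro ℓ v hv
          rw [hstep, PySem.Dict.get?_insert] at hv
          by_cases hl : ℓ = PySem.Str.lower e.2
          · rw [if_pos hl] at hv
            refine ⟨e, List.mem_append_right _ (List.mem_cons_self ..), hl.symm,
              (Option.some.injEq _ _ ▸ hv).symm, ?_⟩
            intro f hf hfl
            rcases List.mem_append.mp hf with hf' | hf'
            · exact le_of_lt (lt_of_lt_of_le hlt (hmmin f hf' (hl ▸ hfl)))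
            · rw [List.mem_singleton.mp hf']
          · rw [if_neg hl] at hv
            obtain ⟨m', hm'P, hm'l, hm'v, hm'min⟩ := ihs ℓ v hv
            refine ⟨m', List.mem_append_left _ hm'P, hm'l, hm'v, ?_⟩
            intro f hf hfl
            rcases List.mem_append.mp hf with hf' | hf'
            · exact hm'min f hf' hfl
            · rw [List.mem_singleton.mp hf'] at hfl
              exact absurd hfl.symm hl
        · intro ℓ hℓ
          rw [hstep, PySem.Dict.get?_insert] at hℓ
          by_cases hl : ℓ = PySem.Str.lower e.2
          · rw [if_pos hl] at hℓ; cases hℓ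
          · rw [if_neg hl] at hℓ
            intro f hf
            rcases List.mem_append.mp hf with hf' | hf'
            · exact ihn ℓ hℓ f hf'
            · rw [List.mem_singleton.mp hf']
              exact fun h => hl h.symm
      · rw [if_neg (by simpa using hlt)] at hstep
        have hle : key3 m ≤ key3 e := not_lt.mp hlt
        refine ⟨?_, ?_, ?_⟩
        · rw [hstep, ihk, hmaps, PySem.Set.ofList_append_singleton,
            PySem.Set.add_of_mem hmem]
        · intro ℓ v hv
          rw [hstep] at hv
          obtain ⟨m', hm'P, hm'l, hm'v, hm'min⟩ := ihs ℓ v hv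
          refine ⟨m', List.mem_append_left _ hm'P, hm'l, hm'v, ?_⟩
          intro f hf hfl
          rcases List.mem_append.mp hf with hf' | hf'
          · exact hm'min f hf' hfl
          · rw [List.mem_singleton.mp hf'] at hfl ⊢
            exact le_trans (hm'min m hmP (hfl ▸ hml)) hle
        · intro ℓ hℓ
          rw [hstep] at hℓ
          intro f hf
          rcases List.mem_append.mp hf with hf' | hf'
          · exact ihn ℓ hℓ f hf'
          · rw [List.mem_singleton.mp hf']
            intro hcontra
            rw [← hcontra] at hℓ
            rw [hℓ] at hg
            cases hg

lemma valOf_injective : Function.Injective valOf := by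
  intro a b h
  simp only [valOf, Prod.mk.injEq] at h
  exact Prod.ext h.1.2.2 h.2

lemma enum_inj (lines : List String) {a b : Int × String}
    (ha : a ∈ PySem.List.enumerate lines 0) (hb : b ∈ PySem.List.enumerate lines 0)
    (h : a.1 = b.1) : a = b := by
  obtain ⟨k, hk, rfl⟩ := (PySem.List.mem_enumerate_iff _ _ _).mp ha
  obtain ⟨k', hk', rfl⟩ := (PySem.List.mem_enumerate_iff _ _ _).mp hb
  simp only [zero_add, Int.natCast_inj] at h
  subst h
  rfl

lemma keep_valOf (u : Bool) (e : Int × String) :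
    (u || decide ((valOf e).1.1 < PySem.List.len RULE_TYPE_ORDER)) = keepB u e.2 := by
  rw [Bool.eq_iff_iff]
  simp only [Bool.or_eq_true, decide_eq_true_eq, keepB, valOf, len_RTO, ruleIndex_lt_iff]

-- a keep-minimal element of its lower-group is globally minimal (unknown types sort last)
lemma min_bridge (u : Bool) (E : List (Int × String)) (e : Int × String)
    (hk : keepB u e.2 = true)
    (hmin : ∀ f ∈ E, PySem.Str.lower f.2 = PySem.Str.lower e.2 → keepB u f.2 = true →
      key3 e ≤ key3 f) :
    ∀ f ∈ E, PySem.Str.lower f.2 = PySem.Str.lower e.2 → key3 e ≤ key3 f := by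
  intro f hf hl
  by_cases hkf : keepB u f.2 = true
  · exact hmin f hf hl hkf
  · have hu : u = false := by
      cases u with
      | false => rfl
      | true => exact absurd (by simp [keepB]) hkf
    have hcf : RULE_TYPE_INDEX.contains (ruleType f.2) = false := by
      cases hc : RULE_TYPE_INDEX.contains (ruleType f.2) with
      | false => rfl
      | true => exact absurd (by simp [keepB, hc]) hkf
    have hce : RULE_TYPE_INDEX.contains (ruleType e.2) = true := by
      simpa [keepB, hu] using hk
    have h8 : ruleIndex f.2 = 8 := ruleIndex_unknown hcf
    have hlt8 : ruleIndex e.2 < 8 := ruleIndex_known hce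
    exact le_of_lt (Prod.Lex.toLex_lt_toLex.mpr (Or.inl (by omega)))

-- ===== VERDICT (by name: the statement is the Claim_ definition above) =====
theorem process_order_spec : Claim_equal_process_order := by
  intro lines u _
  unfold Spec_process_order
  rw [A_eq]
  have hBdef : process_order_alt lines u
      = (PySem.List.sorted
          (((PySem.List.enumerate lines 0).foldl bstep PySem.Dict.empty).values.filter
            (fun v => u || decide (v.1.1 < PySem.List.len RULE_TYPE_ORDER)))
          tripKey false).map (fun v => v.2) := rfl
  rw [hBdef]
  set E := PySem.List.enumerate lines 0 with hE
  set d := E.foldl bstep PySem.Dict.empty with hd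
  set T := PySem.List.sorted E key3 false with hT
  set R := dedupA u T PySem.Set.empty with hR
  set reps := d.values.filter (fun v => u || decide (v.1.1 < PySem.List.len RULE_TYPE_ORDER))
    with hreps
  obtain ⟨hkeys, hsome, hnone⟩ := best_inv E (PySem.List.pairwise_lt_enumerate lines 0)
  have hTpw : T.Pairwise (fun a b => key3 a < key3 b) := T_pairwise lines
  have hRmem : ∀ e, e ∈ R ↔ e ∈ E ∧ keepB u e.2 = true
      ∧ ∀ f ∈ E, PySem.Str.lower f.2 = PySem.Str.lower e.2 → keepB u f.2 = true →
          key3 e ≤ key3 f := by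
    intro e
    rw [hR, dedupA_mem u T PySem.Set.empty hTpw e]
    have hce : PySem.Set.contains PySem.Set.empty (PySem.Str.lower e.2) = false := rfl
    have hmemT : ∀ f : Int × String, f ∈ T ↔ f ∈ E := by
      intro f; rw [hT, PySem.List.mem_sorted]
    constructor
    · rintro ⟨h1, h2, _, h4⟩
      exact ⟨(hmemT e).mp h1, h2, fun f hf => h4 f ((hmemT f).mpr hf)⟩
    · rintro ⟨h1, h2, h4⟩
      exact ⟨(hmemT e).mpr h1, h2, hce, fun f hf => h4 f ((hmemT f).mp hf)⟩
  have hknodup : d.keys.Nodup := by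
    rw [hkeys]; exact PySem.Set.nodup_ofList _
  have hval_mem : ∀ v, v ∈ d.values ↔ ∃ k, d.get? k = some v := by
    intro v
    constructor
    · intro hv
      obtain ⟨p, hp, rfl⟩ := List.mem_map.mp hv
      exact ⟨p.1, PySem.Dict.get?_of_mem_items _ hp hknodup⟩
    · rintro ⟨k, hk⟩
      exact List.mem_map_of_mem (PySem.Dict.mem_items_of_get?_eq_some _ hk)
  have hreps_mem : ∀ v, v ∈ reps ↔ ∃ e, e ∈ E ∧ v = valOf e ∧ keepB u e.2 = true
      ∧ ∀ f ∈ E, PySem.Str.lower f.2 = PySem.Str.lower e.2 → key3 e ≤ key3 f := by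
    intro v
    rw [hreps, List.mem_filter]
    constructor
    · rintro ⟨hv, hkp⟩
      obtain ⟨k, hk⟩ := (hval_mem v).mp hv
      obtain ⟨e, heE, hel, rfl, hemin⟩ := hsome k v hk
      rw [keep_valOf u e] at hkp
      exact ⟨e, heE, rfl, hkp, fun f hf hfl => hemin f hf (hfl.trans hel)⟩
    · rintro ⟨e, heE, rfl, hke, hmin⟩
      cases hg : d.get? (PySem.Str.lower e.2) with
      | none => exact absurd rfl (hnone _ hg e heE)
      | some w =>
        obtain ⟨m, hmE, hml, rfl, hmmin⟩ := hsome _ w hg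
        have h1 : key3 m ≤ key3 e := hmmin e heE rfl
        have h2 : key3 e ≤ key3 m := hmin m hmE hml
        have hem : e = m := enum_inj lines heE hmE (key3_fst_eq (le_antisymm h2 h1))
        subst hem
        exact ⟨(hval_mem _).mpr ⟨_, hg⟩, by rw [keep_valOf u e]; exact hke⟩
  have hR'mem : ∀ v, v ∈ R.map valOf ↔ ∃ e, e ∈ E ∧ v = valOf e ∧ keepB u e.2 = true
      ∧ ∀ f ∈ E, PySem.Str.lower f.2 = PySem.Str.lower e.2 → key3 e ≤ key3 f := by
    intro v
    rw [List.mem_map]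
    constructor
    · rintro ⟨e, heR, rfl⟩
      obtain ⟨h1, h2, h3⟩ := (hRmem e).mp heR
      exact ⟨e, h1, rfl, h2, min_bridge u E e h2 h3⟩
    · rintro ⟨e, heE, rfl, hke, hmin⟩
      exact ⟨e, (hRmem e).mpr ⟨heE, hke, fun f hf hfl _ => hmin f hf hfl⟩, rfl⟩
  have hEnodup : E.Nodup :=
    (PySem.List.pairwise_lt_enumerate lines 0).imp
      (fun h heq => absurd (heq ▸ h) (lt_irrefl _))
  have hTnodup : T.Nodup := (PySem.List.sorted_perm E key3 false).nodup_iff.mpr hEnodup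
  have hRnodup : R.Nodup := List.Sublist.nodup (dedupA_sublist u T _) hTnodup
  have hR'nodup : (R.map valOf).Nodup := hRnodup.map valOf_injective
  have hitemkey : ∀ p ∈ d.items, p.1 = PySem.Str.lower p.2.2 := by
    intro p hp
    have hget : d.get? p.1 = some p.2 := PySem.Dict.get?_of_mem_items _ hp hknodup
    obtain ⟨e, heE, hel, hev, _⟩ := hsome p.1 p.2 hget
    rw [hev]
    exact hel.symm
  have hitemsnodup : d.items.Nodup := by
    refine List.Nodup.of_map (fun p => p.1) ?_
    simpa [PySem.Dict.keys] using hknodup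
  have hvnodup : d.values.Nodup := by
    refine List.Nodup.map_on ?_ hitemsnodup
    intro x hx y hy hxy
    have h1 := hitemkey x hx
    have h2 := hitemkey y hy
    exact Prod.ext (by rw [h1, h2, hxy]) hxy
  have hrepsnodup : reps.Nodup := by rw [hreps]; exact hvnodup.filter _
  have hperm : (R.map valOf).Perm reps :=
    (List.perm_ext_iff_of_nodup hR'nodup hrepsnodup).mpr
      (fun v => (hR'mem v).trans (hreps_mem v).symm)
  have hRpw : R.Pairwise (fun a b => key3 a < key3 b) :=
    List.Pairwise.sublist (dedupA_sublist u T _) hTpw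
  have hpwR' : (R.map valOf).Pairwise (fun a b => tripKey a < tripKey b) :=
    List.pairwise_map.mpr hRpw
  have hsorted : PySem.List.sorted reps tripKey false = R.map valOf :=
    PySem.List.sorted_eq_of_perm_of_pairwise_lt reps (R.map valOf) tripKey hperm hpwR'
  rw [hsorted, List.map_map]
  rfl
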